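-- pv_equiv track=rewrite | github.com/sreeganb/tri-center-xls | ddi_tetramer_modeling/mapping_crosslinks/processing_for_pymol.py | copy_triples_trifunc
-- ===== SOURCE A (Python) =====
-- def copy_triples_trifunc(proteins, residues):
--     # Pairwise options
--     def opts(pA, rA, pB, rB):
--         if pA != pB: return [(0,0),(0,1),(1,0),(1,1)]
--         if rA == rB: return [(0,1),(1,0)]
--         return [(0,0),(1,1),(0,1),(1,0)]
--     c12, c23, c13 = opts(proteins[0],residues[0],proteins[1],residues[1]), \
--                     opts(proteins[1],residues[1],proteins[2],residues[2]), \
--                     opts(proteins[0],residues[0],proteins[2],residues[2])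
--     valid = set()
--     for (a,b) in c12:
--         for (b2,c) in c23:
--             if b != b2: continue
--             for (a2,c2) in c13:
--                 if a==a2 and c==c2: valid.add((a,b,c))
--     return sorted(valid)
-- ===== SOURCE B (Python) =====
-- def copy_triples_trifunc(proteins, residues):
--     # A triple (a,b,c) of labels is valid unless a constrained pair gets equal
--     # labels; a pair (i,j) is constrained exactly when both its protein and its
--     # residue coincide.  No option lists needed: just three boolean flags.
--     def same(i, j):
--         return proteins[i] == proteins[j] and residues[i] == residues[j]
--     e12, e23, e13 = same(0, 1), same(1, 2), same(0, 2)
--     out = []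
--     for n in range(8):
--         a, b, c = n // 4, n // 2 % 2, n % 2
--         if (a != b or not e12) and (b != c or not e23) and (a != c or not e13):
--             out.append((a, b, c))
--     return out
-- ===== Notes on version B (the rewrite author's own statement) =====
-- stated objective: simpler
-- what changed: B eliminates A's option lists and three-level nested join + final sort: it reduces each pair to one boolean flag (constrained iff protein and residue both coincide), enumerates the 8 candidate labellings as the bits of n in range(8), and keeps a triple iff no constrained pair has equal labels; the output comes out already sorted.
import Mathlib
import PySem

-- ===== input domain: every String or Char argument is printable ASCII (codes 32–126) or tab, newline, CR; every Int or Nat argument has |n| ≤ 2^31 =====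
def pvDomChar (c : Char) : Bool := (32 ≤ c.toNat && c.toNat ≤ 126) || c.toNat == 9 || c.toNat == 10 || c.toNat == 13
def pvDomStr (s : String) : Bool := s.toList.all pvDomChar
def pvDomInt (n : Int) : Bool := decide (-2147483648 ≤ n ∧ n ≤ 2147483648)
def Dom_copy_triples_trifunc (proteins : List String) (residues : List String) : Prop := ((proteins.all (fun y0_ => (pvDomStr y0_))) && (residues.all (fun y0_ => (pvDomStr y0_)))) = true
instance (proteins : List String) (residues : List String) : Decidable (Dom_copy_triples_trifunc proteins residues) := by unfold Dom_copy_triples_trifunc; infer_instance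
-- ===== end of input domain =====

-- B drops the option lists and the nested join entirely: a pair is constrained iff its
-- protein AND residue coincide, so B enumerates n = 0..7 and keeps the triple of its
-- bits iff no constrained pair has equal labels (simpler, output already sorted).

-- ===== PORT A =====
-- Python's inner helper `opts`
def optsA (pA rA pB rB : String) : List (Int × Int) :=
  if pA ≠ pB then [(0,0),(0,1),(1,0),(1,1)]
  else if rA = rB then [(0,1),(1,0)]
  else [(0,0),(1,1),(0,1),(1,0)]

def copy_triples_trifunc (proteins : List String) (residues : List String) : List (Int × Int × Int) :=
  let c12 := optsA (PySem.List.pyGetD proteins 0 "") (PySem.List.pyGetD residues 0 "")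
                   (PySem.List.pyGetD proteins 1 "") (PySem.List.pyGetD residues 1 "")
  let c23 := optsA (PySem.List.pyGetD proteins 1 "") (PySem.List.pyGetD residues 1 "")
                   (PySem.List.pyGetD proteins 2 "") (PySem.List.pyGetD residues 2 "")
  let c13 := optsA (PySem.List.pyGetD proteins 0 "") (PySem.List.pyGetD residues 0 "")
                   (PySem.List.pyGetD proteins 2 "") (PySem.List.pyGetD residues 2 "")
  let valid : PySem.Set (Int × Int × Int) :=
    c12.foldl (fun v ab =>
      c23.foldl (fun v bc =>
        if ab.2 ≠ bc.1 then v   -- `continue`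
        else c13.foldl (fun v ac =>
          if ab.1 = ac.1 ∧ bc.2 = ac.2 then PySem.Set.add v (ab.1, ab.2, bc.2) else v) v) v)
      PySem.Set.empty
  -- sorted(valid): every element of `valid` lies in {0,1}³, on which the key
  -- a*4+b*2+c is exactly Python's lexicographic tuple order (injective, so no ties).
  PySem.List.sorted valid (fun t => t.1*4 + t.2.1*2 + t.2.2) false

-- ===== PORT B =====
-- Source B's inner helper `same`
def sameB (proteins residues : List String) (i j : Int) : Bool :=
  PySem.List.pyGetD proteins i "" == PySem.List.pyGetD proteins j ""
    && PySem.List.pyGetD residues i "" == PySem.List.pyGetD residues j ""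

def copy_triples_trifunc_alt (proteins : List String) (residues : List String) : List (Int × Int × Int) :=
  let e12 := sameB proteins residues 0 1
  let e23 := sameB proteins residues 1 2
  let e13 := sameB proteins residues 0 2
  (PySem.List.pyRange 0 8 1).foldl (fun out n =>
    let a := PySem.Int.floordiv n 4
    let b := PySem.Int.mod (PySem.Int.floordiv n 2) 2
    let c := PySem.Int.mod n 2
    if (a ≠ b ∨ ¬ e12) ∧ (b ≠ c ∨ ¬ e23) ∧ (a ≠ c ∨ ¬ e13)
    then out ++ [(a, b, c)] else out) []

-- ===== PRECONDITION & SPEC =====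
-- A indexes proteins[0..2] and residues[0..2]; shorter lists raise IndexError.
def Pre_copy_triples_trifunc (proteins : List String) (residues : List String) : Prop :=
  3 ≤ proteins.length ∧ 3 ≤ residues.length
instance (proteins : List String) (residues : List String) : Decidable (Pre_copy_triples_trifunc proteins residues) := by unfold Pre_copy_triples_trifunc; infer_instance

def pvWitness_copy_triples_trifunc : List String × List String := (["A", "B", "A"], ["1", "2", "3"])

def Spec_copy_triples_trifunc (proteins : List String) (residues : List String) (out : List (Int × Int × Int)) : Prop := out = copy_triples_trifunc_alt proteins residues
instance (proteins : List String) (residues : List String) (out : List (Int × Int × Int)) : Decidable (Spec_copy_triples_trifunc proteins residues out) := by unfold Spec_copy_triples_trifunc; infer_instance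

-- ===== CLAIM (what is proved, stated in full; the proofs are below) =====
def Claim_equal_copy_triples_trifunc : Prop := ∀ (proteins : List String) (residues : List String), Dom_copy_triples_trifunc proteins residues → Pre_copy_triples_trifunc proteins residues → Spec_copy_triples_trifunc proteins residues (copy_triples_trifunc proteins residues)

-- ===== LEMMAS AND PROOFS =====

-- ===== VERDICT (by name: the statement is the Claim_ definition above) =====
set_option maxHeartbeats 2000000 in
theorem copy_triples_trifunc_spec : Claim_equal_copy_triples_trifunc := by
  intro proteins residues _ _
  unfold Spec_copy_triples_trifunc copy_triples_trifunc copy_triples_trifunc_alt sameB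
  generalize PySem.List.pyGetD proteins 0 "" = p0
  generalize PySem.List.pyGetD proteins 1 "" = p1
  generalize PySem.List.pyGetD proteins 2 "" = p2
  generalize PySem.List.pyGetD residues 0 "" = r0
  generalize PySem.List.pyGetD residues 1 "" = r1
  generalize PySem.List.pyGetD residues 2 "" = r2
  by_cases h12 : p0 = p1 <;> by_cases h23 : p1 = p2 <;> by_cases h13 : p0 = p2 <;>
    by_cases g12 : r0 = r1 <;> by_cases g23 : r1 = r2 <;> by_cases g13 : r0 = r2 <;>
    (try subst h12) <;> (try subst h23) <;> (try subst h13) <;>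
    (try subst g12) <;> (try subst g23) <;> (try subst g13) <;>
    simp_all [optsA] <;> decide
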